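-- pv_equiv track=rewrite | github.com/Alignak-monitoring-contrib/alignak-app | alignak_app/dock/widgets/events.py | get_color_event
-- ===== SOURCE A (Python) =====
-- def get_color_event(event_type):
--     """
--     Return corresponding color of event type
--
--     :param event_type: the type of event
--     :type event_type: str
--     :return: the associated color with the event
--     :rtype: str
--     """
--
--     available_colors = {
--         '#27ae60': ['OK', 'UP'],
--         '#2980b9': ['UNKNOWN', 'INFO'],
--         '#e67e22': ['WARNING', 'UNREACHABLE', 'WARN'],
--         '#e74c3c': ['DOWN', 'CRITICAL', 'ALERT'],
--         '#f39c12': ['ACK'],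
--         '#f1c40f': ['DOWNTIME']
--     }
--
--     for key, _ in available_colors.items():
--         if event_type in available_colors[key]:
--             return key
--
--     return ''
-- ===== SOURCE B (Python) =====
-- EVENT_COLORS = {
--     'OK': '#27ae60', 'UP': '#27ae60',
--     'UNKNOWN': '#2980b9', 'INFO': '#2980b9',
--     'WARNING': '#e67e22', 'UNREACHABLE': '#e67e22', 'WARN': '#e67e22',
--     'DOWN': '#e74c3c', 'CRITICAL': '#e74c3c', 'ALERT': '#e74c3c',
--     'ACK': '#f39c12',
--     'DOWNTIME': '#f1c40f',
-- }
--
-- def get_color_event(event_type):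
--     return EVENT_COLORS.get(event_type, '')
-- ===== Notes on version B (the rewrite author's own statement) =====
-- stated objective: idiomatic
-- what changed: Replaced the loop over a color->list-of-types dict with inner list membership tests by a single flat type->color dict and one .get lookup with an empty-string default; the loop and branches disappear.
import Mathlib
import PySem

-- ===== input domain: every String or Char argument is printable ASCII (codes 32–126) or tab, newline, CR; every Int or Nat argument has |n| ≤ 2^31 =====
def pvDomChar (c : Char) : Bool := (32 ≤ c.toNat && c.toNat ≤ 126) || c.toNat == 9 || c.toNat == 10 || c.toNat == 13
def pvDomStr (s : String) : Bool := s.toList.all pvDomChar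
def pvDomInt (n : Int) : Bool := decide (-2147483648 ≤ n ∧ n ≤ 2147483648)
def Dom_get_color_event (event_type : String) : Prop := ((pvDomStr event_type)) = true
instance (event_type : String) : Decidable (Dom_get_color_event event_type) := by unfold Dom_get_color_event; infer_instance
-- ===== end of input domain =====

-- B replaces A's loop over a color→event-list dict (with inner membership tests) by one
-- flat event→color dict lookup with default '' (idiomatic; same return value everywhere).

-- ===== PORT A =====
-- the 'for key, _ in available_colors.items(): if event_type in available_colors[key]: return key' loop
def pvLoopA : List (String × List String) → String → String
  | [], _ => ""
  | (key, v) :: rest, event_type => if event_type ∈ v then key else pvLoopA rest event_type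

def get_color_event (event_type : String) : String :=
  let available_colors : List (String × List String) :=
    [("#27ae60", ["OK", "UP"]),
     ("#2980b9", ["UNKNOWN", "INFO"]),
     ("#e67e22", ["WARNING", "UNREACHABLE", "WARN"]),
     ("#e74c3c", ["DOWN", "CRITICAL", "ALERT"]),
     ("#f39c12", ["ACK"]),
     ("#f1c40f", ["DOWNTIME"])]
  pvLoopA available_colors event_type

-- ===== PORT B =====
def pvEventColors : PySem.Dict String String := PySem.Dict.ofList
  [("OK", "#27ae60"), ("UP", "#27ae60"),
   ("UNKNOWN", "#2980b9"), ("INFO", "#2980b9"),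
   ("WARNING", "#e67e22"), ("UNREACHABLE", "#e67e22"), ("WARN", "#e67e22"),
   ("DOWN", "#e74c3c"), ("CRITICAL", "#e74c3c"), ("ALERT", "#e74c3c"),
   ("ACK", "#f39c12"),
   ("DOWNTIME", "#f1c40f")]

def get_color_event_alt (event_type : String) : String :=
  PySem.Dict.getD pvEventColors event_type ""

-- ===== PRECONDITION & SPEC =====
def Spec_get_color_event (event_type : String) (out : String) : Prop := out = get_color_event_alt event_type
instance (event_type : String) (out : String) : Decidable (Spec_get_color_event event_type out) := by unfold Spec_get_color_event; infer_instance

-- ===== CLAIM (what is proved, stated in full; the proofs are below) =====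
def Claim_equal_get_color_event : Prop := ∀ (event_type : String), Dom_get_color_event event_type → Spec_get_color_event event_type (get_color_event event_type)

-- ===== LEMMAS AND PROOFS =====

-- ===== VERDICT (by name: the statement is the Claim_ definition above) =====
theorem get_color_event_spec : Claim_equal_get_color_event := by
  intro e _
  unfold Spec_get_color_event
  by_cases h0 : e = "OK"
  · subst h0; decide
  by_cases h1 : e = "UP"
  · subst h1; decide
  by_cases h2 : e = "UNKNOWN"
  · subst h2; decide
  by_cases h3 : e = "INFO"
  · subst h3; decide
  by_cases h4 : e = "WARNING"
  · subst h4; decide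
  by_cases h5 : e = "UNREACHABLE"
  · subst h5; decide
  by_cases h6 : e = "WARN"
  · subst h6; decide
  by_cases h7 : e = "DOWN"
  · subst h7; decide
  by_cases h8 : e = "CRITICAL"
  · subst h8; decide
  by_cases h9 : e = "ALERT"
  · subst h9; decide
  by_cases h10 : e = "ACK"
  · subst h10; decide
  by_cases h11 : e = "DOWNTIME"
  · subst h11; decide
  unfold get_color_event get_color_event_alt pvEventColors
  simp [pvLoopA, PySem.Dict.getD, PySem.Dict.get?, PySem.Dict.ofList,
    PySem.Dict.update, PySem.Dict.insert, PySem.Dict.empty, h0, Ne.symm h0, h1, Ne.symm h1, h2, Ne.symm h2, h3, Ne.symm h3, h4, Ne.symm h4, h5, Ne.symm h5, h6, Ne.symm h6, h7, Ne.symm h7, h8, Ne.symm h8, h9, Ne.symm h9, h10, Ne.symm h10, h11, Ne.symm h11]
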